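-- pv_equiv track=rewrite | github.com/airr-community/ogrdb | ogrdb/sequence/sequence_routes.py | delineate_v_gene
-- ===== SOURCE A (Python) =====
-- default_imgt_fr1 = (0, 78)
--
-- default_imgt_cdr1 = (78, 114)
--
-- default_imgt_fr2 = (114, 165)
--
-- default_imgt_cdr2 = (165, 195)
--
-- default_imgt_fr3 = (195, 312)
--
-- def delineate_v_gene(seq, feature_ranges=[default_imgt_fr1, default_imgt_cdr1, default_imgt_fr2, default_imgt_cdr2, default_imgt_fr3]):
--     coords = {}
--     imgt_fr1, imgt_cdr1, imgt_fr2, imgt_cdr2, imgt_fr3 = feature_ranges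
--
--     #if seq[0] == '.':
--     #    coords['fwr1_start'] = None     # FWR start
--     #    coords['fwr1_end'] = None     # FWR1 stop
--     #    coords['cdr1_start'] = None      # CDR1 start
--     #    coords['cdr1_end'] = None      # CDR1 end
--     #    coords['fwr2_start'] = None     # FWR2 start
--     #    coords['fwr2_end'] = None     # FWR2 end
--     #    coords['cdr2_start'] = None    # CDR2 start
--     #    coords['cdr2_end'] = None     # CDR2 end
--     #    coords['fwr3_start'] = None     # FWR3 start
--     #    coords['fwr3_end'] = None     # FWR3 end
--     #    coords['cdr3_start'] = None     # CDR3 start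
--     #    return coords       # not going to guess about 5' incomplete sequences
--                             # can revisit if this ever becomes an issue
--
--     pos = 1
--     coords['fwr1_start'] = pos     # FWR start
--     pos += len(seq[slice(*imgt_fr1)].replace('.', '')) - 1
--     coords['fwr1_end'] = pos     # FWR1 stop
--     pos += 1
--     coords['cdr1_start'] = pos      # CDR1 start
--     pos += len(seq[slice(*imgt_cdr1)].replace('.', '')) - 1
--     coords['cdr1_end'] = pos      # CDR1 end
--     pos += 1
--     coords['fwr2_start'] = pos     # FWR2 start
--     pos += len(seq[slice(*imgt_fr2)].replace('.', '')) - 1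
--     coords['fwr2_end'] = pos      # FWR2 end
--     pos += 1
--     coords['cdr2_start'] = pos     # CDR2 start
--     pos += len(seq[slice(*imgt_cdr2)].replace('.', '')) - 1
--     coords['cdr2_end'] = pos     # CDR2 end
--     pos += 1
--     coords['fwr3_start'] = pos     # FWR3 start
--     pos += len(seq[slice(*imgt_fr3)].replace('.', '')) - 1
--     coords['fwr3_end'] = pos     # FWR3 end
--     pos += 1
--     coords['cdr3_start'] = pos     # CDR3 start
--
--     # fix up for any coords that are incomplete at the 5' end
--
--     for feat in 'fwr1_start', 'fwr1_end', 'cdr1_start', 'cdr1_end', 'fwr2_start', 'fwr2_end', 'cdr2_start', 'cdr2_end', 'fwr3_start', 'fwr3_end', 'cdr3_start':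
--         if coords[feat] < 1:
--             coords[feat] = None
--
--     return coords
-- ===== SOURCE B (Python) =====
-- default_imgt_fr1 = (0, 78)
-- default_imgt_cdr1 = (78, 114)
-- default_imgt_fr2 = (114, 165)
-- default_imgt_cdr2 = (165, 195)
-- default_imgt_fr3 = (195, 312)
--
-- def delineate_v_gene(seq, feature_ranges=[default_imgt_fr1, default_imgt_cdr1, default_imgt_fr2, default_imgt_cdr2, default_imgt_fr3]):
--     # Each coordinate is computed independently from scratch: join the region
--     # slices up to the boundary, strip the gap dots, and take the length.
--     # No running accumulator and no separate fix-up pass.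
--     if len(feature_ranges) != 5:
--         raise ValueError('feature_ranges must contain exactly five ranges')
--
--     def upto(k):
--         return len(''.join(seq[slice(*r)] for r in feature_ranges[:k]).replace('.', ''))
--
--     def clip(v):
--         return v if v >= 1 else None
--
--     coords = {}
--     for i, name in enumerate(('fwr1', 'cdr1', 'fwr2', 'cdr2', 'fwr3')):
--         coords[name + '_start'] = clip(upto(i) + 1)
--         coords[name + '_end'] = clip(upto(i + 1))
--     coords['cdr3_start'] = clip(upto(5) + 1)
--     return coords
-- ===== Notes on version B (the rewrite author's own statement) =====
-- stated objective: alternative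
-- what changed: Instead of threading one running position through the five regions and then nulling sub-1 entries in a separate fix-up pass, B computes every coordinate independently from scratch (join the region slices up to the boundary, strip the dots, take the length) and applies the nulling at insertion time; it trades a little recomputation for stateless per-coordinate formulas.
import Mathlib
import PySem

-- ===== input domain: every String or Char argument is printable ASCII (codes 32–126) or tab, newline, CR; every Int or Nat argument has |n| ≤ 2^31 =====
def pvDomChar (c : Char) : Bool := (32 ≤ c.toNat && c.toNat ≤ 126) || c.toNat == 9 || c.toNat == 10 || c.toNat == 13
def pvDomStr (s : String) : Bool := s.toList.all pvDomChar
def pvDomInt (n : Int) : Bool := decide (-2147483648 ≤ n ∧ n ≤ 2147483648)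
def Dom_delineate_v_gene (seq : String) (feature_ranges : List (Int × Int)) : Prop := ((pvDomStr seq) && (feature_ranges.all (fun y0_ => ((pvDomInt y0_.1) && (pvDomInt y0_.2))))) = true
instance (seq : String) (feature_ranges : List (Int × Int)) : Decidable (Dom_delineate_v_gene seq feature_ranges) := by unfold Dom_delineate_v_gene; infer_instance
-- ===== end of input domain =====

-- B computes each coordinate independently (join the region slices up to the boundary,
-- strip dots, take the length, null at insertion) instead of A's running position plus
-- fix-up pass; alternative decomposition, same results (return value only, no mutation).

-- ===== PORT A =====
-- len(seq[slice(a,b)].replace('.', ''))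
def pvNonDotA (seq : String) (r : Int × Int) : Int :=
  PySem.Str.len (PySem.Str.replace (PySem.Str.slice seq (some r.1) (some r.2)) "." "")

-- loop body of A's fix-up loop: if coords[feat] < 1: coords[feat] = None
def pvFix (d : PySem.Dict String (Option Int)) (feat : String) : PySem.Dict String (Option Int) :=
  match d.get? feat with
  | some (some v) => if v < 1 then d.insert feat none else d
  | _ => d

def pvFeatNames : List String :=
  ["fwr1_start", "fwr1_end", "cdr1_start", "cdr1_end", "fwr2_start", "fwr2_end",
   "cdr2_start", "cdr2_end", "fwr3_start", "fwr3_end", "cdr3_start"]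

def delineate_v_gene (seq : String) (feature_ranges : List (Int × Int)) : List (String × Option Int) :=
  match feature_ranges with
  | [imgt_fr1, imgt_cdr1, imgt_fr2, imgt_cdr2, imgt_fr3] =>
    let coords : PySem.Dict String (Option Int) := PySem.Dict.empty
    let pos : Int := 1
    let coords := coords.insert "fwr1_start" (some pos)
    let pos := pos + (pvNonDotA seq imgt_fr1 - 1)
    let coords := coords.insert "fwr1_end" (some pos)
    let pos := pos + 1
    let coords := coords.insert "cdr1_start" (some pos)
    let pos := pos + (pvNonDotA seq imgt_cdr1 - 1)
    let coords := coords.insert "cdr1_end" (some pos)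
    let pos := pos + 1
    let coords := coords.insert "fwr2_start" (some pos)
    let pos := pos + (pvNonDotA seq imgt_fr2 - 1)
    let coords := coords.insert "fwr2_end" (some pos)
    let pos := pos + 1
    let coords := coords.insert "cdr2_start" (some pos)
    let pos := pos + (pvNonDotA seq imgt_cdr2 - 1)
    let coords := coords.insert "cdr2_end" (some pos)
    let pos := pos + 1
    let coords := coords.insert "fwr3_start" (some pos)
    let pos := pos + (pvNonDotA seq imgt_fr3 - 1)
    let coords := coords.insert "fwr3_end" (some pos)
    let pos := pos + 1
    let coords := coords.insert "cdr3_start" (some pos)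
    -- fix-up loop: if coords[feat] < 1: coords[feat] = None
    let coords := pvFeatNames.foldl pvFix coords
    coords.items
  | _ => []  -- ValueError: tuple unpacking fails; excluded by Pre_

-- ===== PORT B =====
def pvRegionNames : List String := ["fwr1", "cdr1", "fwr2", "cdr2", "fwr3"]

-- len(''.join(seq[slice(*r)] for r in feature_ranges[:k]).replace('.', ''))
def pvUpto (seq : String) (feature_ranges : List (Int × Int)) (k : Nat) : Int :=
  PySem.Str.len (PySem.Str.replace
    (PySem.Str.join "" ((feature_ranges.take k).map
      (fun r => PySem.Str.slice seq (some r.1) (some r.2)))) "." "")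

-- v if v >= 1 else None
def pvClip (v : Int) : Option Int := if v ≥ 1 then some v else none

def delineate_v_gene_alt (seq : String) (feature_ranges : List (Int × Int)) : List (String × Option Int) :=
  if feature_ranges.length = 5 then
    let coords : PySem.Dict String (Option Int) :=
      (PySem.List.enumerate pvRegionNames).foldl (fun d p =>
        (d.insert (p.2 ++ "_start") (pvClip (pvUpto seq feature_ranges p.1.toNat + 1))).insert
          (p.2 ++ "_end") (pvClip (pvUpto seq feature_ranges (p.1.toNat + 1)))) PySem.Dict.empty
    let coords := coords.insert "cdr3_start" (pvClip (pvUpto seq feature_ranges 5 + 1))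
    coords.items
  else []  -- raise ValueError; excluded by Pre_

-- ===== PRECONDITION & SPEC =====
-- A raises ValueError (unpacking) unless feature_ranges has exactly five elements.
def Pre_delineate_v_gene (seq : String) (feature_ranges : List (Int × Int)) : Prop :=
  feature_ranges.length = 5
instance (seq : String) (feature_ranges : List (Int × Int)) : Decidable (Pre_delineate_v_gene seq feature_ranges) := by unfold Pre_delineate_v_gene; infer_instance

def pvWitness_delineate_v_gene : String × (List (Int × Int)) :=
  ("AC..GT", [(0, 2), (2, 3), (3, 4), (4, 5), (5, 6)])

def Spec_delineate_v_gene (seq : String) (feature_ranges : List (Int × Int)) (out : List (String × Option Int)) : Prop := out = delineate_v_gene_alt seq feature_ranges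
instance (seq : String) (feature_ranges : List (Int × Int)) (out : List (String × Option Int)) : Decidable (Spec_delineate_v_gene seq feature_ranges out) := by unfold Spec_delineate_v_gene; infer_instance

-- ===== CLAIM (what is proved, stated in full; the proofs are below) =====
def Claim_equal_delineate_v_gene : Prop := ∀ (seq : String) (feature_ranges : List (Int × Int)), Dom_delineate_v_gene seq feature_ranges → Pre_delineate_v_gene seq feature_ranges → Spec_delineate_v_gene seq feature_ranges (delineate_v_gene seq feature_ranges)

-- ===== LEMMAS AND PROOFS =====
-- replace with a one-char pattern and empty replacement is a filter
theorem replace_go_dot (fuel : Nat) (l acc : List Char) (h : l.length ≤ fuel) :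
    PySem.Chars.replace.go ['.'] [] fuel l acc = acc.reverse ++ l.filter (· != '.') := by
  induction fuel generalizing l acc with
  | zero =>
    cases l with
    | nil => simp [PySem.Chars.replace.go]
    | cons c t => simp at h
  | succ fuel ih =>
    cases l with
    | nil => simp [PySem.Chars.replace.go]
    | cons c t =>
      rw [PySem.Chars.replace.go]
      by_cases hc : c = '.'
      · have hp : List.isPrefixOf ['.'] (c :: t) = true := by
          simp [List.isPrefixOf, hc]
        rw [if_pos hp]
        simp only [hc, List.length_cons, List.length_nil, List.drop_succ_cons,
          List.drop_zero, List.reverse_nil, List.nil_append]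
        rw [ih t acc (by simpa using Nat.le_of_succ_le_succ (by simpa using h))]
        simp
      · have hp : List.isPrefixOf ['.'] (c :: t) = false := by
          simp [List.isPrefixOf]; exact fun he => (hc he.symm).elim
        rw [if_neg (by simp [hp])]
        rw [ih t (c :: acc) (by simpa using Nat.le_of_succ_le_succ (by simpa using h))]
        simp [hc]

theorem replace_dot_filter (cs : List Char) :
    PySem.Chars.replace cs ['.'] [] = cs.filter (· != '.') := by
  rw [PySem.Chars.replace]
  simp only [List.isEmpty_cons]
  exact (replace_go_dot cs.length cs [] le_rfl).trans (by simp)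

-- counting non-dots: A's per-region count as a filtered length
theorem pvNonDotA_eq (seq : String) (r : Int × Int) :
    pvNonDotA seq r
      = (((PySem.Str.slice seq (some r.1) (some r.2)).toList.filter (· != '.')).length : Int) := by
  simp only [pvNonDotA, PySem.Str.len_eq, PySem.Str.toList_replace,
    show ("." : String).toList = ['.'] from rfl, show ("" : String).toList = [] from rfl,
    replace_dot_filter]

theorem intercalate_nil_flatten (xs : List (List Char)) :
    List.intercalate [] xs = xs.flatten := by
  induction xs with
  | nil => rfl
  | cons a t ih =>
    cases t with
    | nil => simp [List.intercalate, List.intersperse]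
    | cons b u =>
      simp only [List.intercalate, List.intersperse] at ih ⊢
      simp [ih]

-- B's prefix count as a sum of A's per-region counts
theorem pvUpto_eq (seq : String) (feature_ranges : List (Int × Int)) (k : Nat) :
    pvUpto seq feature_ranges k
      = ((feature_ranges.take k).map (pvNonDotA seq)).sum := by
  simp only [pvUpto, PySem.Str.len_eq, PySem.Str.toList_replace,
    show ("." : String).toList = ['.'] from rfl, show ("" : String).toList = [] from rfl,
    replace_dot_filter, PySem.Str.toList_join, PySem.Chars.join, intercalate_nil_flatten]
  generalize feature_ranges.take k = L
  induction L with
  | nil => simp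
  | cons r t ih =>
    simp only [List.map_cons, List.flatten_cons, List.filter_append, List.length_append,
      List.sum_cons, Nat.cast_add, ← ih, pvNonDotA_eq]

def pvAdj : Option Int → Option Int
  | some v => if v < 1 then none else some v
  | none => none

theorem pvAdj_idem (x : Option Int) : pvAdj (pvAdj x) = pvAdj x := by
  cases x with
  | none => rfl
  | some v => simp only [pvAdj]; split_ifs <;> simp <;> omega

theorem insert_mk_fresh {ν : Type} (l : List (String × ν)) (k : String) (v : ν)
    (h : (PySem.Dict.mk l).contains k = false) :
    (PySem.Dict.mk l).insert k v = PySem.Dict.mk (l ++ [(k, v)]) :=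
  PySem.Dict.ext (PySem.Dict.items_insert_of_not_contains _ v h)

theorem pv_val_of_mem (d : PySem.Dict String (Option Int)) (hn : d.keys.Nodup)
    {kv : String × Option Int} (hm : kv ∈ d.items) : d.get? kv.1 = some kv.2 :=
  PySem.Dict.get?_of_mem_items d (by exact (Prod.mk.eta (p := kv)) ▸ hm) hn

theorem pvFix_items (d : PySem.Dict String (Option Int)) (hn : d.keys.Nodup) (k : String) :
    (pvFix d k).items = d.items.map (fun kv => if kv.1 = k then (kv.1, pvAdj kv.2) else kv) := by
  unfold pvFix
  cases hg : d.get? k with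
  | none =>
    show d.items = _
    have hk : k ∉ d.keys := by
      intro hmem
      have := (PySem.Dict.get?_eq_none_iff_not_mem_keys (d := d) (k := k)).mp hg
      exact this hmem
    refine ((List.map_congr_left ?_).trans (List.map_id _)).symm
    intro kv hkv
    have h1 : kv.1 ≠ k := by
      intro he
      exact hk (he ▸ PySem.Dict.mem_keys_of_mem_items d hkv)
    simp [h1]
  | some w =>
    have hval : ∀ kv ∈ d.items, kv.1 = k → kv.2 = w := by
      intro kv hm he
      have := pv_val_of_mem d hn hm
      rw [he, hg] at this
      exact (Option.some.injEq _ _ ▸ this.symm)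
    cases w with
    | none =>
      show d.items = _
      refine ((List.map_congr_left ?_).trans (List.map_id _)).symm
      intro kv hkv
      by_cases h1 : kv.1 = k
      · have hv2 := hval kv hkv h1
        have hadj : pvAdj kv.2 = kv.2 := by rw [hv2]; rfl
        rw [if_pos h1, hadj]
        exact Prod.mk.eta
      · simp [h1]
    | some v =>
      show (if v < 1 then d.insert k none else d).items = _
      split_ifs with h1
      · rw [PySem.Dict.items_insert_of_contains d none
          (by rw [PySem.Dict.contains_eq_isSome_get?, hg]; rfl)]
        apply List.map_congr_left
        intro kv hkv
        by_cases h2 : kv.1 = k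
        · have := hval kv hkv h2
          simp [h2, this, pvAdj, h1]
        · simp [h2]
      · refine ((List.map_congr_left ?_).trans (List.map_id _)).symm
        intro kv hkv
        by_cases h2 : kv.1 = k
        · have hv2 := hval kv hkv h2
          have hadj : pvAdj kv.2 = kv.2 := by rw [hv2]; simp [pvAdj, h1]
          rw [if_pos h2, hadj]
          exact Prod.mk.eta
        · simp [h2]

theorem pvFix_keys (d : PySem.Dict String (Option Int)) (hn : d.keys.Nodup) (k : String) :
    (pvFix d k).keys = d.keys := by
  simp only [PySem.Dict.keys, pvFix_items d hn k, List.map_map]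
  apply List.map_congr_left
  intro kv _
  by_cases h1 : kv.1 = k <;> simp [h1, Function.comp]

theorem pvFix_fold_items (l : List String) (d : PySem.Dict String (Option Int))
    (hn : d.keys.Nodup) :
    (l.foldl pvFix d).items
      = d.items.map (fun kv => if kv.1 ∈ l then (kv.1, pvAdj kv.2) else kv) := by
  induction l generalizing d with
  | nil => simp
  | cons k l ih =>
    have hn' : (pvFix d k).keys.Nodup := by rw [pvFix_keys d hn k]; exact hn
    rw [List.foldl_cons, ih (pvFix d k) hn', pvFix_items d hn k, List.map_map]
    apply List.map_congr_left
    intro kv _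
    by_cases h1 : kv.1 = k
    · by_cases h2 : kv.1 ∈ l <;>
        simp [Function.comp, h1, pvAdj_idem, List.mem_cons]
    · by_cases h2 : kv.1 ∈ l <;>
        simp [Function.comp, h1, h2, List.mem_cons]

theorem pvAdj_clip (v w : Int) (h : v = w) : pvAdj (some v) = pvClip w := by
  subst h
  simp only [pvAdj, pvClip]
  split_ifs <;> first | rfl | omega

theorem delineate_core (seq : String) (r1 r2 r3 r4 r5 : Int × Int) :
    delineate_v_gene seq [r1, r2, r3, r4, r5] = delineate_v_gene_alt seq [r1, r2, r3, r4, r5] := by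
  simp only [delineate_v_gene, delineate_v_gene_alt, List.length_cons, List.length_nil,
    reduceIte]
  rw [show (PySem.Dict.empty : PySem.Dict String (Option Int)) = PySem.Dict.mk [] from rfl]
  rw [insert_mk_fresh _ "fwr1_start" _ (by simp)]
  rw [insert_mk_fresh _ "fwr1_end" _ (by simp)]
  rw [insert_mk_fresh _ "cdr1_start" _ (by simp)]
  rw [insert_mk_fresh _ "cdr1_end" _ (by simp)]
  rw [insert_mk_fresh _ "fwr2_start" _ (by simp)]
  rw [insert_mk_fresh _ "fwr2_end" _ (by simp)]
  rw [insert_mk_fresh _ "cdr2_start" _ (by simp)]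
  rw [insert_mk_fresh _ "cdr2_end" _ (by simp)]
  rw [insert_mk_fresh _ "fwr3_start" _ (by simp)]
  rw [insert_mk_fresh _ "fwr3_end" _ (by simp)]
  rw [insert_mk_fresh _ "cdr3_start" _ (by simp)]
  simp only [List.nil_append, List.cons_append]
  rw [pvFix_fold_items pvFeatNames _ (by simp [PySem.Dict.keys_mk])]
  simp only [pvFeatNames, List.map, List.mem_cons, List.not_mem_nil]
  norm_num
  rw [show PySem.List.enumerate pvRegionNames
      = [((0:Int),"fwr1"),(1,"cdr1"),(2,"fwr2"),(3,"cdr2"),(4,"fwr3")] from by decide]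
  simp only [List.foldl]
  norm_num [show ((0:Int).toNat)=0 from rfl, show ((1:Int).toNat)=1 from rfl,
    show ((2:Int).toNat)=2 from rfl, show ((3:Int).toNat)=3 from rfl,
    show ((4:Int).toNat)=4 from rfl]
  rw [show ("fwr1" ++ "_start" : String) = "fwr1_start" from rfl]
  rw [show ("fwr1" ++ "_end" : String) = "fwr1_end" from rfl]
  rw [show ("cdr1" ++ "_start" : String) = "cdr1_start" from rfl]
  rw [show ("cdr1" ++ "_end" : String) = "cdr1_end" from rfl]
  rw [show ("fwr2" ++ "_start" : String) = "fwr2_start" from rfl]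
  rw [show ("fwr2" ++ "_end" : String) = "fwr2_end" from rfl]
  rw [show ("cdr2" ++ "_start" : String) = "cdr2_start" from rfl]
  rw [show ("cdr2" ++ "_end" : String) = "cdr2_end" from rfl]
  rw [show ("fwr3" ++ "_start" : String) = "fwr3_start" from rfl]
  rw [show ("fwr3" ++ "_end" : String) = "fwr3_end" from rfl]
  rw [show ({ items := [] } : PySem.Dict String (Option Int)) = PySem.Dict.mk [] from rfl]
  rw [insert_mk_fresh _ "fwr1_start" _ (by simp)]
  rw [insert_mk_fresh _ "fwr1_end" _ (by simp)]
  rw [insert_mk_fresh _ "cdr1_start" _ (by simp)]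
  rw [insert_mk_fresh _ "cdr1_end" _ (by simp)]
  rw [insert_mk_fresh _ "fwr2_start" _ (by simp)]
  rw [insert_mk_fresh _ "fwr2_end" _ (by simp)]
  rw [insert_mk_fresh _ "cdr2_start" _ (by simp)]
  rw [insert_mk_fresh _ "cdr2_end" _ (by simp)]
  rw [insert_mk_fresh _ "fwr3_start" _ (by simp)]
  rw [insert_mk_fresh _ "fwr3_end" _ (by simp)]
  rw [insert_mk_fresh _ "cdr3_start" _ (by simp)]
  simp only [List.nil_append, List.cons_append]
  show _ = PySem.Dict.items _
  simp only [pvUpto_eq, List.take, List.map, List.sum_cons, List.sum_nil,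
    List.cons.injEq, Prod.mk.injEq, true_and]
  and_intros <;> first
    | (apply pvAdj_clip; ring)
    | exact trivial

-- ===== VERDICT (by name: the statement is the Claim_ definition above) =====
theorem delineate_v_gene_spec : Claim_equal_delineate_v_gene := by
  intro seq fr _ hpre
  unfold Spec_delineate_v_gene
  match fr, hpre with
  | [r1, r2, r3, r4, r5], _ => exact delineate_core seq r1 r2 r3 r4 r5
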